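-- pv_equiv track=rewrite | github.com/shahshivam058/Software-Engineering | data_structure_and_algo/array/array_practices.py | count_positive_negative_zero
-- ===== SOURCE A (Python) =====
-- def count_positive_negative_zero(arr) :
--     zero = positive = negative = 0
--     n = len(arr)
--
--     for index in range(n) :
--
--         if arr[index] > 0 :
--             positive += 1
--         elif arr[index]  == 0 :
--             zero += 1
--         else:
--             negative += 1
--
--     return zero , positive , negative
-- ===== SOURCE B (Python) =====
-- def count_positive_negative_zero(arr):
--     positive = sum(1 for x in arr if x > 0)
--     zero = sum(1 for x in arr if x == 0)
--     negative = len(arr) - positive - zero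
--     return zero, positive, negative
-- ===== Notes on version B (the rewrite author's own statement) =====
-- stated objective: idiomatic
-- what changed: Replaces A's single index-driven loop with three-way branching by two independent comprehension counts (positives, zeros) and derives negatives by subtraction from the length.
import Mathlib
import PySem

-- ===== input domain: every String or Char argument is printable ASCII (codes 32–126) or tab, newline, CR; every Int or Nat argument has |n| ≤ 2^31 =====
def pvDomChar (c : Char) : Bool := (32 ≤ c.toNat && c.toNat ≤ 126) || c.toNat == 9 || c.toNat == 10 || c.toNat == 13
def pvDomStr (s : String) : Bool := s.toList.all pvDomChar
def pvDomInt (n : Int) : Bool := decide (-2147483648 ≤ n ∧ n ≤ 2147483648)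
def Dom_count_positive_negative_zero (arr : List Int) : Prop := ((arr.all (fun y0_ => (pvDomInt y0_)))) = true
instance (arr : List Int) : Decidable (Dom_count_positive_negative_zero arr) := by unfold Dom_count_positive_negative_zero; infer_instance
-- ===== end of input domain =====

-- B replaces A's single indexed loop with two independent count passes plus arithmetic for negatives (objective: idiomatic).

-- ===== PORT A =====
def count_positive_negative_zero (arr : List Int) : Int × Int × Int :=
  -- n = len(arr); loop 'for index in range(n)' with arr[index] (always in range here)
  (PySem.List.pyRange 0 (arr.length : Int) 1).foldl
    (fun (st : Int × Int × Int) index =>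
      if PySem.List.pyGetD arr index 0 > 0 then (st.1, st.2.1 + 1, st.2.2)
      else if PySem.List.pyGetD arr index 0 == 0 then (st.1 + 1, st.2.1, st.2.2)
      else (st.1, st.2.1, st.2.2 + 1))
    (0, 0, 0)

-- ===== PORT B =====
def count_positive_negative_zero_alt (arr : List Int) : Int × Int × Int :=
  ((arr.countP (fun x => x == 0) : Int),
   (arr.countP (fun x => decide (x > 0)) : Int),
   (arr.length : Int) - (arr.countP (fun x => decide (x > 0)) : Int)
     - (arr.countP (fun x => x == 0) : Int))

-- ===== PRECONDITION & SPEC =====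
def Spec_count_positive_negative_zero (arr : List Int) (out : Int × Int × Int) : Prop := out = count_positive_negative_zero_alt arr
instance (arr : List Int) (out : Int × Int × Int) : Decidable (Spec_count_positive_negative_zero arr out) := by unfold Spec_count_positive_negative_zero; infer_instance

-- ===== CLAIM (what is proved, stated in full; the proofs are below) =====
def Claim_equal_count_positive_negative_zero : Prop := ∀ (arr : List Int), Dom_count_positive_negative_zero arr → Spec_count_positive_negative_zero arr (count_positive_negative_zero arr)

-- ===== LEMMAS AND PROOFS =====

theorem cpnz_foldl_inv (arr : List Int) (z p m : Int) :
    arr.foldl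
      (fun (st : Int × Int × Int) v =>
        if v > 0 then (st.1, st.2.1 + 1, st.2.2)
        else if v == 0 then (st.1 + 1, st.2.1, st.2.2)
        else (st.1, st.2.1, st.2.2 + 1))
      (z, p, m)
    = (z + arr.countP (fun x => x == 0),
       p + arr.countP (fun x => decide (x > 0)),
       m + ((arr.length : Int)
            - arr.countP (fun x => decide (x > 0))
            - arr.countP (fun x => x == 0))) := by
  induction arr generalizing z p m with
  | nil => simp
  | cons a t ih =>
    simp only [List.foldl_cons]
    by_cases h1 : a > 0
    · have hz : (a == 0) = false := by simp; omega
      rw [if_pos h1, ih]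
      simp only [List.countP_cons, hz, decide_true, h1,
        Bool.false_eq_true, if_false, List.length_cons]
      refine Prod.ext ?_ (Prod.ext ?_ ?_) <;> (simp; try omega)
    · by_cases h2 : a = 0
      · have hz : (a == 0) = true := by simp [h2]
        rw [if_neg h1, if_pos hz, ih]
        simp only [List.countP_cons, h2, decide_eq_true_eq, List.length_cons]
        refine Prod.ext ?_ (Prod.ext ?_ ?_) <;> (simp; try omega)
      · have hz : (a == 0) = false := by simp [h2]
        rw [if_neg h1, if_neg (show ¬((a == 0) = true) by simp [hz]), ih]
        simp only [List.countP_cons, hz, List.length_cons]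
        refine Prod.ext ?_ (Prod.ext ?_ ?_) <;> (simp; try omega)

-- ===== VERDICT (by name: the statement is the Claim_ definition above) =====
theorem count_positive_negative_zero_spec : Claim_equal_count_positive_negative_zero := by
  intro arr _
  show count_positive_negative_zero arr = count_positive_negative_zero_alt arr
  unfold count_positive_negative_zero count_positive_negative_zero_alt
  rw [PySem.List.foldl_pyRange_zero_pyGetD' arr 0
    (fun (st : Int × Int × Int) v =>
      if v > 0 then (st.1, st.2.1 + 1, st.2.2)
      else if v == 0 then (st.1 + 1, st.2.1, st.2.2)
      else (st.1, st.2.1, st.2.2 + 1)) (0, 0, 0)]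
  rw [cpnz_foldl_inv]
  simp
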